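-- pv_equiv track=rewrite | github.com/excellalabs/django-bend | django_bend/parsing.py | sql_list_splitter
-- ===== SOURCE A (Python) =====
-- def sql_list_splitter(sqlstr):
--     # parse a string of format (0, 'a', 'blah'),('b', 1, 'parens()')
--     # into a list for each parentheses group
--     #
--     # If not wrapped in parentheses, will split on commas
--     # e.g. "0, 'a', 'blah, test', 'parens()'"
--     # returns [0, "'a'", "'blah, test'", "'parens()'"]
--     new_str = ''
--     is_open_group = False
--     is_open_string = False
--     last_char_was_escape = False
--
--     for c in sqlstr:
--         if not last_char_was_escape:
--             if c == ',' and not is_open_group and not is_open_string: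
--                 c = '\n'
--             elif c == ')' and not is_open_group and not is_open_string:
--                 raise Exception("unexpected ')' when parsing string `%s`" % sqlstr)
--             elif c == ')' and is_open_group and not is_open_string:
--                 is_open_group = not is_open_group
--             elif c == '(' and is_open_group and not is_open_string:
--                 raise Exception("unexpected '(' when parsing string `%s`" % sqlstr)
--             elif c == '(' and not is_open_group and not is_open_string:
--                 is_open_group = not is_open_group
--             elif c == "'":
--                 is_open_string = not is_open_string
--
--             last_char_was_escape = (c == '\\')
--         else:
--             last_char_was_escape = False
--
--         new_str += c
--
--     result = new_str.split('\n')
--     return result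
-- ===== SOURCE B (Python) =====
-- def sql_list_splitter(sqlstr):
--     # Same character state machine as the original, but builds the result
--     # list directly (result + current buffer) instead of joining with a
--     # '\n' sentinel and splitting at the end.
--     result = []
--     current = []
--     is_open_group = False
--     is_open_string = False
--     last_char_was_escape = False
--
--     for c in sqlstr:
--         sep = False
--         if not last_char_was_escape:
--             if c == ',' and not is_open_group and not is_open_string:
--                 sep = True
--             elif c == ')' and not is_open_group and not is_open_string:
--                 raise Exception("unexpected ')' when parsing string `%s`" % sqlstr)
--             elif c == ')' and is_open_group and not is_open_string:
--                 is_open_group = not is_open_group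
--             elif c == '(' and is_open_group and not is_open_string:
--                 raise Exception("unexpected '(' when parsing string `%s`" % sqlstr)
--             elif c == '(' and not is_open_group and not is_open_string:
--                 is_open_group = not is_open_group
--             elif c == "'":
--                 is_open_string = not is_open_string
--
--             last_char_was_escape = (c == '\\')
--         else:
--             last_char_was_escape = False
--
--         if sep or c == '\n':
--             result.append(''.join(current))
--             current = []
--         else:
--             current.append(c)
--
--     result.append(''.join(current))
--     return result
-- ===== Notes on version B (the rewrite author's own statement) =====
-- stated objective: alternative
-- what changed: B keeps the same character state machine but appends finished pieces to a result list directly (result list + current buffer), instead of concatenating a newline-sentinel string character by character and splitting it at the end.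
import Mathlib
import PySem

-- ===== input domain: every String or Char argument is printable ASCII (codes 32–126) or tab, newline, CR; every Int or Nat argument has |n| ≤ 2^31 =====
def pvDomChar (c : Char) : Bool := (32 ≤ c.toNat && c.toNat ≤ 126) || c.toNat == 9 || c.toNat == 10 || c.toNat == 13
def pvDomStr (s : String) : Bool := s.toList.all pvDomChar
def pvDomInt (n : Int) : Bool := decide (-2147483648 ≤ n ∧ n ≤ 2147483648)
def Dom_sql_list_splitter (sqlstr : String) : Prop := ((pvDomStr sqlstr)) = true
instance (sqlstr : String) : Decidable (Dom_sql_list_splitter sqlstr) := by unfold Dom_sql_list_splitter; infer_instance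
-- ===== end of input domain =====

-- B keeps A's character state machine but builds the result list directly (result list +
-- current buffer) instead of concatenating a '\n'-sentinel string and splitting it at the end.

-- ===== PORT A =====
-- A's for-loop; state = (new_str, is_open_group, is_open_string, last_char_was_escape);
-- `none` = the Exception A raises.
def sqlLoopA : List Char → List Char → Bool → Bool → Bool → Option (List Char)
  | [], acc, _, _, _ => some acc
  | c :: rest, acc, g, s, e =>
    if e then
      -- last_char_was_escape: reset it, append c unchanged
      sqlLoopA rest (acc ++ [c]) g s false
    else if c == ',' && !g && !s then
      -- c = '\n'; then last_char_was_escape = ('\n' == '\\') = false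
      sqlLoopA rest (acc ++ ['\n']) g s false
    else if c == ')' && !g && !s then
      none  -- raise Exception("unexpected ')' when parsing string `%s`" % sqlstr)
    else if c == ')' && g && !s then
      sqlLoopA rest (acc ++ [c]) (!g) s (c == '\\')
    else if c == '(' && g && !s then
      none  -- raise Exception("unexpected '(' when parsing string `%s`" % sqlstr)
    else if c == '(' && !g && !s then
      sqlLoopA rest (acc ++ [c]) (!g) s (c == '\\')
    else if c == '\'' then
      sqlLoopA rest (acc ++ [c]) g (!s) (c == '\\')
    else
      sqlLoopA rest (acc ++ [c]) g s (c == '\\')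

def sql_list_splitter (sqlstr : String) : List String :=
  match sqlLoopA sqlstr.toList [] false false false with
  | none => []   -- Python raises here; excluded by Pre_sql_list_splitter
  | some newStr => (PySem.Chars.splitOn newStr ['\n']).map String.ofList  -- new_str.split('\n')

-- ===== PORT B =====
-- `if sep or c == '\n': result.append(''.join(current)); current = []
--  else: current.append(c)`   for a non-separator character (sep = False):
def sqlEmit (res : List String) (cur : List Char) (c : Char) : List String × List Char :=
  if c == '\n' then (res ++ [String.ofList cur], []) else (res, cur ++ [c])

-- B's for-loop; state = (result, current, is_open_group, is_open_string, last_char_was_escape)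
def sqlLoopB : List Char → List String → List Char → Bool → Bool → Bool → Option (List String)
  | [], res, cur, _, _, _ => some (res ++ [String.ofList cur])  -- final result.append(''.join(current))
  | c :: rest, res, cur, g, s, e =>
    if e then
      sqlLoopB rest (sqlEmit res cur c).1 (sqlEmit res cur c).2 g s false
    else if c == ',' && !g && !s then
      -- sep = True: flush current
      sqlLoopB rest (res ++ [String.ofList cur]) [] g s false
    else if c == ')' && !g && !s then
      none  -- raise Exception("unexpected ')' when parsing string `%s`" % sqlstr)
    else if c == ')' && g && !s then
      sqlLoopB rest (sqlEmit res cur c).1 (sqlEmit res cur c).2 (!g) s (c == '\\')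
    else if c == '(' && g && !s then
      none  -- raise Exception("unexpected '(' when parsing string `%s`" % sqlstr)
    else if c == '(' && !g && !s then
      sqlLoopB rest (sqlEmit res cur c).1 (sqlEmit res cur c).2 (!g) s (c == '\\')
    else if c == '\'' then
      sqlLoopB rest (sqlEmit res cur c).1 (sqlEmit res cur c).2 g (!s) (c == '\\')
    else
      sqlLoopB rest (sqlEmit res cur c).1 (sqlEmit res cur c).2 g s (c == '\\')

def sql_list_splitter_alt (sqlstr : String) : List String :=
  (sqlLoopB sqlstr.toList [] [] false false false).getD []

-- ===== PRECONDITION & SPEC =====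
-- Pre_ excludes exactly the inputs on which A raises (and B raises the same Exception):
-- a ')' outside any group, or a '(' inside an open group, read outside quotes/escapes.
-- The condition is inherently contextual, so it is a minimal boolean scan of the
-- group/string/escape context; it builds no output and computes neither program's result.
def pvSqlOk : List Char → Bool → Bool → Bool → Bool
  | [], _, _, _ => true
  | c :: rest, g, s, e =>
    if e then pvSqlOk rest g s false
    else if c == ',' && !g && !s then pvSqlOk rest g s false
    else if c == ')' && !g && !s then false
    else if c == ')' && g && !s then pvSqlOk rest (!g) s (c == '\\')
    else if c == '(' && g && !s then false
    else if c == '(' && !g && !s then pvSqlOk rest (!g) s (c == '\\')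
    else if c == '\'' then pvSqlOk rest g (!s) (c == '\\')
    else pvSqlOk rest g s (c == '\\')

def Pre_sql_list_splitter (sqlstr : String) : Prop :=
  pvSqlOk sqlstr.toList false false false = true

instance (sqlstr : String) : Decidable (Pre_sql_list_splitter sqlstr) := by
  unfold Pre_sql_list_splitter; infer_instance

def pvWitness_sql_list_splitter : String := "(0, 'a\\'s', 'x()'),(1, 'b,c')"

def Spec_sql_list_splitter (sqlstr : String) (out : List String) : Prop := out = sql_list_splitter_alt sqlstr
instance (sqlstr : String) (out : List String) : Decidable (Spec_sql_list_splitter sqlstr out) := by unfold Spec_sql_list_splitter; infer_instance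

-- ===== CLAIM (what is proved, stated in full; the proofs are below) =====
def Claim_equal_sql_list_splitter : Prop := ∀ (sqlstr : String), Dom_sql_list_splitter sqlstr → Pre_sql_list_splitter sqlstr → Spec_sql_list_splitter sqlstr (sql_list_splitter sqlstr)

-- ===== LEMMAS AND PROOFS =====

-- splitting a character list on '\n', structurally
def splitNl : List Char → List (List Char)
  | [] => [[]]
  | c :: rest =>
    if c = '\n' then [] :: splitNl rest
    else
      match splitNl rest with
      | [] => [[c]]
      | t :: ts => (c :: t) :: ts

theorem splitNl_ne_nil (l : List Char) : splitNl l ≠ [] := by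
  cases l with
  | nil => simp [splitNl]
  | cons c rest =>
    simp only [splitNl]
    split
    · simp
    · split <;> simp

-- PySem.Chars.splitOn.go on the one-character separator '\n', against splitNl
theorem splitOn_go_nl (fuel : Nat) : ∀ (l cur : List Char) (acc : List (List Char)),
    l.length ≤ fuel →
    PySem.Chars.splitOn.go ['\n'] fuel l cur acc =
      acc.reverse ++ (match splitNl l with
                      | [] => [cur.reverse]
                      | t :: ts => (cur.reverse ++ t) :: ts) := by
  induction fuel with
  | zero =>
    intro l cur acc hl
    have : l = [] := List.eq_nil_of_length_eq_zero (Nat.le_zero.mp hl)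
    subst this
    simp [PySem.Chars.splitOn.go, splitNl]
  | succ n ih =>
    intro l cur acc hl
    cases l with
    | nil => simp [PySem.Chars.splitOn.go, splitNl]
    | cons c rest =>
      rw [PySem.Chars.splitOn.go]
      by_cases hc : c = '\n'
      · subst hc
        have hpre : List.isPrefixOf ['\n'] ('\n' :: rest) = true := by
          simp [List.isPrefixOf]
        simp only [hpre, if_pos]
        rw [ih _ _ _ (by simpa using Nat.le_of_succ_le_succ hl)]
        cases h : splitNl rest with
        | nil => exact absurd h (splitNl_ne_nil rest)
        | cons t ts => simp [splitNl, h]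
      · have hpre : List.isPrefixOf ['\n'] (c :: rest) = false := by
          simpa [List.isPrefixOf] using fun h => absurd h.symm hc
        simp only [hpre, Bool.false_eq_true, if_neg, not_false_eq_true]
        rw [ih _ _ _ (by simpa using Nat.le_of_succ_le_succ hl)]
        cases h : splitNl rest with
        | nil => exact absurd h (splitNl_ne_nil rest)
        | cons t ts => simp [splitNl, h, if_neg hc]

theorem splitOn_nl (l : List Char) : PySem.Chars.splitOn l ['\n'] = splitNl l := by
  unfold PySem.Chars.splitOn
  rw [splitOn_go_nl (l.length + 1) l [] [] (Nat.le_succ _)]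
  cases h : splitNl l with
  | nil => exact absurd h (splitNl_ne_nil l)
  | cons t ts => simp

theorem splitNl_append_nl (acc : List Char) :
    splitNl (acc ++ ['\n']) = splitNl acc ++ [[]] := by
  induction acc with
  | nil => simp [splitNl]
  | cons c rest ih =>
    by_cases hc : c = '\n'
    · subst hc; simp [splitNl, ih]
    · simp only [List.cons_append, splitNl, if_neg hc, ih]
      cases h : splitNl rest with
      | nil => exact absurd h (splitNl_ne_nil rest)
      | cons t ts => simp

theorem splitNl_append_char (acc : List Char) (c : Char) (hc : ¬ c = '\n') :
    ∀ (R : List (List Char)) (cur : List Char), splitNl acc = R ++ [cur] →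
    splitNl (acc ++ [c]) = R ++ [cur ++ [c]] := by
  induction acc with
  | nil =>
    intro R cur h
    rw [splitNl] at h
    cases R with
    | cons r R' =>
      exfalso
      have hlen := congrArg List.length h
      simp at hlen
    | nil =>
      obtain ⟨hcur, -⟩ := List.cons_eq_cons.mp h
      simp [splitNl, if_neg hc, ← hcur]
  | cons d rest ih =>
    intro R cur h
    by_cases hd : d = '\n'
    · subst hd
      rw [splitNl, if_pos rfl] at h
      cases R with
      | nil =>
        obtain ⟨-, h2⟩ := List.cons_eq_cons.mp h
        exact absurd h2 (splitNl_ne_nil rest)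
      | cons r R' =>
        obtain ⟨hr, hrest⟩ := List.cons_eq_cons.mp h
        rw [List.cons_append, splitNl, if_pos rfl, ih R' cur hrest, ← hr]
        simp
    · rw [splitNl, if_neg hd] at h
      cases hsr : splitNl rest with
      | nil => exact absurd hsr (splitNl_ne_nil rest)
      | cons t ts =>
        rw [hsr] at h
        rw [List.cons_append, splitNl, if_neg hd]
        cases R with
        | nil =>
          obtain ⟨hcur, hts⟩ := List.cons_eq_cons.mp h
          rw [ih [] t (by simp [hsr, hts])]
          rw [← hcur]
          simp
        | cons r R' =>
          obtain ⟨hr, hrest⟩ := List.cons_eq_cons.mp h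
          rw [ih (t :: R') cur (by rw [hsr, hrest]; rfl)]
          simp [← hr]

-- one non-separator step: B's flush/append bookkeeping vs appending to A's string
theorem emit_rel (res : List String) (cur : List Char) (c : Char) (acc : List Char)
    (h : splitNl acc = res.map String.toList ++ [cur]) :
    splitNl (acc ++ [c]) = (sqlEmit res cur c).1.map String.toList ++ [(sqlEmit res cur c).2] := by
  by_cases hc : c = '\n'
  · subst hc
    rw [splitNl_append_nl, h]
    simp [sqlEmit, String.toList_ofList]
  · rw [splitNl_append_char acc c hc _ _ h]
    simp [sqlEmit, hc]

-- main loop invariant: B's (result, current) is exactly the '\n'-split of A's new_str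
theorem loop_rel : ∀ (l acc : List Char) (res : List String) (cur : List Char) (g s e : Bool),
    splitNl acc = res.map String.toList ++ [cur] →
    (sqlLoopA l acc g s e).map (fun a => (splitNl a).map String.ofList) = sqlLoopB l res cur g s e := by
  intro l
  induction l with
  | nil =>
    intro acc res cur g s e h
    simp [sqlLoopA, sqlLoopB, h, Function.comp_def, String.ofList_toList]
  | cons c rest ih =>
    intro acc res cur g s e h
    simp only [sqlLoopA, sqlLoopB]
    split_ifs with h1 h2 h3 h4 h5 h6 h7
    · exact ih _ _ _ _ _ _ (emit_rel res cur c acc h)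
    · -- top-level comma: A appends '\n', B flushes
      apply ih
      rw [splitNl_append_nl, h]
      simp [String.toList_ofList]
    · simp
    · exact ih _ _ _ _ _ _ (emit_rel res cur c acc h)
    · simp
    · exact ih _ _ _ _ _ _ (emit_rel res cur c acc h)
    · exact ih _ _ _ _ _ _ (emit_rel res cur c acc h)
    · exact ih _ _ _ _ _ _ (emit_rel res cur c acc h)

-- on Pre_, A's loop does not raise
theorem ok_some : ∀ (l acc : List Char) (g s e : Bool),
    pvSqlOk l g s e = true → (sqlLoopA l acc g s e).isSome = true := by
  intro l
  induction l with
  | nil => intro acc g s e _; simp [sqlLoopA]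
  | cons c rest ih =>
    intro acc g s e hok
    simp only [pvSqlOk] at hok
    simp only [sqlLoopA]
    split_ifs at hok ⊢ <;> exact ih _ _ _ _ hok

-- ===== VERDICT (by name: the statement is the Claim_ definition above) =====
theorem sql_list_splitter_spec : Claim_equal_sql_list_splitter := by
  unfold Claim_equal_sql_list_splitter
  intro sqlstr _ hpre
  unfold Spec_sql_list_splitter sql_list_splitter sql_list_splitter_alt
  have h0 : splitNl [] = ([] : List String).map String.toList ++ [[]] := by simp [splitNl]
  have hm := loop_rel sqlstr.toList [] [] [] false false false h0
  obtain ⟨a, ha⟩ := Option.isSome_iff_exists.mp (ok_some sqlstr.toList [] false false false hpre)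
  rw [ha] at hm ⊢
  rw [← hm]
  simp [splitOn_nl]
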